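-- pv_equiv track=rewrite | github.com/AdamZhouSE/pythonHomework | Code/CodeRecords/2823/60891/284690.py | f
-- ===== SOURCE A (Python) =====
-- def f(k, n):
--     list_kn = []
--     for i in range(k):
--         list_kn.append([])
--     for i in range(k):
--         for j in range(n):
--             list_kn[i].append(0)
--     for i in range(n):
--         list_kn[0][i] = i + 1
--     for i in range(1, k):
--         for j in range(n):
--             ans = 0
--             for l in range(1, j + 1):
--                 ans += (list_kn[i - 1][l - 1] * ((j + 1) // l))
--             list_kn[i][j] = ans
--     return list_kn[k - 1][n - 1]
-- ===== SOURCE B (Python) =====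
-- def f(k, n):
--     # Divisor-sieve DP: row_new[j] = prefix_{m<=j+1} d[m] - row[j],
--     # where d[m] = sum of row[l-1] over divisors l of m (Dirichlet swap of
--     # sum_{l=1}^{j} row[l-1] * ((j+1)//l)).  O(k*n*log n) vs A's O(k*n^2).
--     row = list(range(1, n + 1))
--     for _ in range(k - 1):
--         d = [0] * (n + 1)
--         for l in range(1, n + 1):
--             v = row[l - 1]
--             for m in range(l, n + 1, l):
--                 d[m] += v
--         new = []
--         s = 0
--         for j in range(n):
--             s += d[j + 1]
--             new.append(s - row[j])
--         row = new
--     return row[n - 1]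
-- ===== Notes on version B (the rewrite author's own statement) =====
-- stated objective: faster
-- what changed: Replaces the O(n^2)-per-row inner sum of prev[l-1]*((j+1)//l) by a divisor sieve (add prev[l-1] at every multiple of l) plus a running prefix sum, using the identity sum_{l<=j} prev[l-1]*((j+1)//l) = sum_{m<=j+1} sum_{l|m} prev[l-1] - prev[j]; intended as faster (asymptotic), measured 17-25x at the largest sizes where both finish.
import Mathlib
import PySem

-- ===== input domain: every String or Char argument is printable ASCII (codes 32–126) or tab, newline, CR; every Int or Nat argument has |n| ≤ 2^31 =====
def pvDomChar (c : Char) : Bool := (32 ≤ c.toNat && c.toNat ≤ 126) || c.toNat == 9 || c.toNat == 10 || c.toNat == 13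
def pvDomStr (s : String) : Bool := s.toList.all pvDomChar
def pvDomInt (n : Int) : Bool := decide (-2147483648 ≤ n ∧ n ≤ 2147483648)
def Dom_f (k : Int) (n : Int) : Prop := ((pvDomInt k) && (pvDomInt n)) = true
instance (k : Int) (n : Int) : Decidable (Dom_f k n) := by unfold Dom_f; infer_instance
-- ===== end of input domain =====

-- B replaces A's O(n^2)-per-row inner sum by a divisor sieve plus a running prefix sum
-- (identity: sum_{l<=j} prev[l-1]*((j+1)//l) = sum_{m<=j+1} sum_{l|m} prev[l-1] - prev[j]).

-- ===== PORT A =====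
def f (k : Int) (n : Int) : Int :=
  let kn := (PySem.List.pyRange 0 k 1).foldl (fun acc (_ : Int) => acc ++ [([] : List Int)]) []
  let kn := (PySem.List.pyRange 0 k 1).foldl (fun acc i =>
      (PySem.List.pyRange 0 n 1).foldl (fun acc (_ : Int) =>
        acc.set i.toNat ((acc.getD i.toNat []) ++ [(0 : Int)])) acc) kn
  let kn := (PySem.List.pyRange 0 n 1).foldl (fun acc i =>
      acc.set 0 ((acc.getD 0 []).set i.toNat (i + 1))) kn
  let kn := (PySem.List.pyRange 1 k 1).foldl (fun acc i =>
      (PySem.List.pyRange 0 n 1).foldl (fun acc j =>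
        let ans := (PySem.List.pyRange 1 (j + 1) 1).foldl
          (fun ans l => ans + (acc.getD (i - 1).toNat []).getD (l - 1).toNat 0
                              * PySem.Int.floordiv (j + 1) l) 0
        acc.set i.toNat ((acc.getD i.toNat []).set j.toNat ans)) acc) kn
  (kn.getD (k - 1).toNat []).getD (n - 1).toNat 0

-- ===== PORT B =====
def f_alt (k : Int) (n : Int) : Int :=
  let row := PySem.List.pyRange 1 (n + 1) 1
  let row := (PySem.List.pyRange 0 (k - 1) 1).foldl (fun row (_ : Int) =>
      let d := (PySem.List.pyRange 1 (n + 1) 1).foldl (fun d l =>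
          let v := row.getD (l - 1).toNat 0
          (PySem.List.pyRange l (n + 1) l).foldl
            (fun d m => d.set m.toNat (d.getD m.toNat 0 + v)) d)
        (List.replicate (n + 1).toNat (0 : Int))
      ((PySem.List.pyRange 0 n 1).foldl (fun (p : List Int × Int) j =>
          let s := p.2 + d.getD (j + 1).toNat 0
          (p.1 ++ [s - row.getD j.toNat 0], s)) (([], 0) : List Int × Int)).1) row
  row.getD (n - 1).toNat 0

-- ===== PRECONDITION & SPEC =====
-- Pre_f excludes exactly the inputs where the Python A raises IndexError (k <= 0 or n <= 0:
-- the table is empty in one dimension and the final read list_kn[k-1][n-1] fails).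
def Pre_f (k : Int) (n : Int) : Prop := 1 ≤ k ∧ 1 ≤ n
instance (k : Int) (n : Int) : Decidable (Pre_f k n) := by unfold Pre_f; infer_instance
def pvWitness_f : Int × Int := (3, 5)

def Spec_f (k : Int) (n : Int) (out : Int) : Prop := out = f_alt k n
instance (k : Int) (n : Int) (out : Int) : Decidable (Spec_f k n out) := by unfold Spec_f; infer_instance

-- ===== CLAIM (what is proved, stated in full; the proofs are below) =====
def Claim_equal_f : Prop := ∀ (k : Int) (n : Int), Dom_f k n → Pre_f k n → Spec_f k n (f k n)

-- ===== LEMMAS AND PROOFS =====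

-- The common mathematical value: Rv i j = value of row i, column j of A's table.
def Rv : Nat → Nat → Int
  | 0 => fun j => (j : Int) + 1
  | i + 1 => fun j => ∑ l ∈ Finset.range j, Rv i l * (((j + 1) / (l + 1) : ℕ) : ℤ)

-- ---- generic list lemmas ----
theorem getD_append_mid {α : Type} (xs ys : List α) (d : α) :
    (xs ++ ys).getD xs.length d = ys.getD 0 d := by
  simp [List.getD_eq_getElem?_getD, List.getElem?_append_right (le_refl xs.length)]

theorem set_append_mid {α : Type} (xs ys : List α) (v : α) :
    (xs ++ ys).set xs.length v = xs ++ ys.set 0 v := by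
  rw [List.set_append_right _ _ (le_refl xs.length)]; simp

theorem getD_set_self {α : Type} (xs : List α) (p : Nat) (v d : α) (h : p < xs.length) :
    (xs.set p v).getD p d = v := by
  simp [List.getD_eq_getElem?_getD, List.getElem?_set_self h]

theorem getD_set_ne {α : Type} (xs : List α) {p q : Nat} (v d : α) (h : p ≠ q) :
    (xs.set p v).getD q d = xs.getD q d := by
  simp [List.getD_eq_getElem?_getD, List.getElem?_set_ne h]

theorem sum_map_range (n : Nat) (g : Nat → Int) :
    ((List.range n).map g).sum = ∑ i ∈ Finset.range n, g i := by
  induction n with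
  | zero => simp
  | succ m ih => simp [List.range_succ, Finset.sum_range_succ, ih]

-- ---- stage 1: k appends of [] ----
theorem stage1 {α : Type} (xs : List α) (init : List (List Int)) :
    xs.foldl (fun acc (_ : α) => acc ++ [([] : List Int)]) init
      = init ++ List.replicate xs.length [] := by
  induction xs generalizing init with
  | nil => simp
  | cons x t ih => simp [ih, List.replicate_succ]

-- ---- stage 2: fill each row with zeros ----
theorem appendZeros {α : Type} : ∀ (nL : List α) (pre : List (List Int)) (cur : List Int)
    (back : List (List Int)),
    nL.foldl (fun acc (_ : α) => acc.set pre.length ((acc.getD pre.length []) ++ [(0 : Int)]))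
      (pre ++ cur :: back)
    = pre ++ (cur ++ List.replicate nL.length 0) :: back := by
  intro nL
  induction nL with
  | nil => intro pre cur back; simp
  | cons x t ih =>
    intro pre cur back
    rw [List.foldl_cons]
    have h1 : (pre ++ cur :: back).getD pre.length [] = cur := by
      rw [getD_append_mid]; rfl
    have h2 : (pre ++ cur :: back).set pre.length (cur ++ [(0:Int)])
        = pre ++ (cur ++ [(0:Int)]) :: back := by
      rw [set_append_mid]; rfl
    rw [h1, h2, ih]
    simp [List.replicate_succ]

theorem stage2 {α : Type} (nL : List α) : ∀ (m : Nat) (pre : List (List Int)),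
    (List.range' pre.length m).foldl
        (fun acc i => nL.foldl
          (fun acc (_ : α) => acc.set i ((acc.getD i []) ++ [(0 : Int)])) acc)
        (pre ++ List.replicate m ([] : List Int))
    = pre ++ List.replicate m (List.replicate nL.length 0) := by
  intro m
  induction m with
  | zero => intro pre; simp
  | succ m ih =>
    intro pre
    rw [List.range'_succ, List.foldl_cons, List.replicate_succ]
    rw [appendZeros nL pre [] (List.replicate m [])]
    have h2 : pre.length + 1 = (pre ++ [List.replicate nL.length (0:Int)]).length := by simp
    rw [List.nil_append, h2,
      show pre ++ List.replicate nL.length (0:Int) :: List.replicate m ([]:List Int)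
          = (pre ++ [List.replicate nL.length 0]) ++ List.replicate m [] by simp,
      ih (pre ++ [List.replicate nL.length 0])]
    simp [List.replicate_succ]

theorem foldInv {σ : Type} (Inv : Nat → σ → Prop) (G : σ → Nat → σ) :
    ∀ (m a : Nat) (s : σ),
      (∀ t s', a ≤ t → t < a + m → Inv t s' → Inv (t + 1) (G s' t)) → Inv a s →
      Inv (a + m) ((List.range' a m).foldl G s) := by
  intro m
  induction m with
  | zero => intro a s _ h0; simpa using h0
  | succ m ih =>
    intro a s hstep h0
    rw [List.range'_succ, List.foldl_cons]
    have h1 : Inv (a + 1) (G s a) := hstep a s (le_refl a) (by omega) h0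
    have := ih (a + 1) (G s a) (fun t s' ht1 ht2 hI => hstep t s' (by omega) (by omega) hI) h1
    rw [show a + (m + 1) = a + 1 + m by omega]
    exact this

-- ---- stage 3: write g i into position i of row 0 ----
theorem setRow0 {α : Type} (xs : List α) (g : α → List Int → List Int) :
    ∀ (r0 : List Int) (rest : List (List Int)),
      xs.foldl (fun acc i => acc.set 0 (g i (acc.getD 0 []))) (r0 :: rest)
        = (xs.foldl (fun r i => g i r) r0) :: rest := by
  induction xs with
  | nil => intro r0 rest; rfl
  | cons x t ih =>
    intro r0 rest
    have h1 : ((r0 :: rest).set 0 (g x ((r0 :: rest).getD 0 []))) = (g x r0) :: rest := by simp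
    simp only [List.foldl_cons, h1, ih]

theorem fillVals (m : Nat) (g : Nat → Int) :
    ∀ (t : Nat) (pre rest : List Int), pre.length = t → rest.length = m →
      (List.range' t m).foldl (fun r i => r.set i (g i)) (pre ++ rest)
        = pre ++ (List.range' t m).map g := by
  induction m with
  | zero => intro t pre rest _ hr; rw [List.length_eq_zero_iff] at hr; simp [hr]
  | succ m ih =>
    intro t pre rest hp hr
    match rest, hr with
    | x :: rest', hr =>
      rw [List.range'_succ, List.foldl_cons]
      have h1 : (pre ++ x :: rest').set t (g t) = (pre ++ [g t]) ++ rest' := by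
        subst hp
        rw [List.set_append_right _ _ (le_refl pre.length)]
        simp
      rw [h1]
      have h2 : t + 1 = (pre ++ [g t]).length := by simp [hp]
      rw [h2, ih _ _ _ rfl (by simpa using hr), ← h2]
      simp

-- ---- A stage 4: the fold touching only the middle row ----
theorem midfold (xs : List Nat) (front back : List (List Int)) (r : Nat)
    (hr : front.length = r)
    (G : List (List Int) → Nat → Int)
    (hG : ∀ row' j, G (front ++ row' :: back) j = G (front ++ [] :: back) j) :
    ∀ (row : List Int),
      xs.foldl (fun acc j => acc.set r ((acc.getD r []).set j (G acc j)))
        (front ++ row :: back)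
      = front ++ (xs.foldl (fun rw j => rw.set j (G (front ++ [] :: back) j)) row) :: back := by
  subst hr
  induction xs with
  | nil => intro row; rfl
  | cons x t ih =>
    intro row
    rw [List.foldl_cons, List.foldl_cons]
    have h1 : (front ++ row :: back).getD front.length [] = row := by
      rw [getD_append_mid]; rfl
    have h2 : (front ++ row :: back).set front.length (row.set x (G (front ++ row :: back) x))
        = front ++ (row.set x (G (front ++ row :: back) x)) :: back := by
      rw [set_append_mid]; rfl
    rw [h1, h2, hG row x, ih]

-- ---- the inner "ans" sum equals Rv ----
theorem foldl_add_eq_sum {α : Type} (g : α → Int) : ∀ (xs : List α) (c : Int),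
    xs.foldl (fun a x => a + g x) c = c + (xs.map g).sum := by
  intro xs
  induction xs with
  | nil => simp
  | cons x t ih => intro c; simp [ih, add_assoc]

theorem ansFold (prev : List Int) (q jn : Nat)
    (hprev : ∀ ln, ln < jn → prev.getD ln 0 = Rv q ln) :
    (List.range jn).foldl
        (fun a ln => a + prev.getD (((1 + ln : ℕ) : ℤ) - 1).toNat 0
          * PySem.Int.floordiv ((jn : Int) + 1) ((1 + ln : ℕ) : ℤ))
        0 = Rv (q + 1) jn := by
  rw [foldl_add_eq_sum, sum_map_range, zero_add]
  rw [show Rv (q + 1) jn = ∑ l ∈ Finset.range jn, Rv q l * (((jn + 1) / (l + 1) : ℕ) : ℤ) from rfl]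
  refine Finset.sum_congr rfl (fun ln hln => ?_)
  rw [Finset.mem_range] at hln
  rw [show (((1 + ln : ℕ) : ℤ) - 1).toNat = ln by omega, hprev ln hln]
  congr 1
  rw [show ((jn : Int) + 1) = ((jn + 1 : ℕ) : ℤ) by push_cast; ring,
    PySem.Int.floordiv_natCast]
  congr 2
  omega

-- ---- Dirichlet swap ----
theorem divisors_filter (p N : Nat) (h1 : 1 ≤ p) (h2 : p ≤ N) :
    (Finset.Icc 1 N).filter (fun l => l ∣ p) = p.divisors := by
  ext l
  simp only [Finset.mem_filter, Finset.mem_Icc, Nat.mem_divisors]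
  constructor
  · rintro ⟨⟨hl1, _⟩, hd⟩; exact ⟨hd, by omega⟩
  · rintro ⟨hd, _⟩
    have hle := Nat.le_of_dvd (by omega) hd
    have h0 : 1 ≤ l := Nat.one_le_iff_ne_zero.mpr (by rintro rfl; simp at hd; omega)
    exact ⟨⟨h0, by omega⟩, hd⟩

theorem dirichlet (g : Nat → Int) : ∀ (M : Nat),
    ∑ m ∈ Finset.Icc 1 M, ∑ l ∈ m.divisors, g l
      = ∑ l ∈ Finset.Icc 1 M, g l * ((M / l : ℕ) : ℤ) := by
  intro M
  induction M with
  | zero => simp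
  | succ M ih =>
    rw [Finset.sum_Icc_succ_top (by omega), ih]
    have hsucc : ∀ l, (((M + 1) / l : ℕ) : ℤ)
        = ((M / l : ℕ) : ℤ) + (if l ∣ M + 1 then 1 else 0) := by
      intro l
      rw [Nat.succ_div]
      split_ifs with h <;> push_cast <;> ring
    calc ∑ l ∈ Finset.Icc 1 M, g l * ((M / l : ℕ) : ℤ) + ∑ l ∈ (M+1).divisors, g l
        = ∑ l ∈ Finset.Icc 1 (M+1), g l * ((M / l : ℕ) : ℤ)
          + ∑ l ∈ Finset.Icc 1 (M+1), (if l ∣ M + 1 then g l else 0) := by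
          rw [Finset.sum_Icc_succ_top (by omega : 1 ≤ M + 1) (fun l => g l * ((M / l : ℕ) : ℤ))]
          rw [Nat.div_eq_of_lt (by omega)]
          rw [← Finset.sum_filter, divisors_filter (M+1) (M+1) (by omega) (le_refl _)]
          push_cast; ring
      _ = ∑ l ∈ Finset.Icc 1 (M+1), g l * (((M + 1) / l : ℕ) : ℤ) := by
          rw [← Finset.sum_add_distrib]
          refine Finset.sum_congr rfl (fun l _ => ?_)
          rw [hsucc l]
          split_ifs <;> ring

-- ---- B: sieve characterization ----
theorem addMultiples (v : Int) : ∀ (ms : List Int) (d : List Int) (p : Nat),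
    (∀ m ∈ ms, 0 ≤ m ∧ m.toNat < d.length) → ms.Nodup →
    ((ms.foldl (fun d m => d.set m.toNat (d.getD m.toNat 0 + v)) d).getD p 0
        = d.getD p 0 + (if (p : Int) ∈ ms then v else 0))
    ∧ (ms.foldl (fun d m => d.set m.toNat (d.getD m.toNat 0 + v)) d).length = d.length := by
  intro ms
  induction ms with
  | nil => intro d p _ _; simp
  | cons m t ih =>
    intro d p hb hnd
    have hm := hb m (by simp)
    have hlen : (d.set m.toNat (d.getD m.toNat 0 + v)).length = d.length := List.length_set
    have hb' : ∀ x ∈ t, 0 ≤ x ∧ x.toNat < (d.set m.toNat (d.getD m.toNat 0 + v)).length := by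
      intro x hx; rw [hlen]; exact hb x (List.mem_cons_of_mem _ hx)
    obtain ⟨ihv, ihl⟩ := ih (d.set m.toNat (d.getD m.toNat 0 + v)) p hb' hnd.of_cons
    rw [List.foldl_cons]
    refine ⟨?_, by rw [ihl, hlen]⟩
    rw [ihv]
    by_cases hpm : (p : Int) = m
    · have hpN : p = m.toNat := by omega
      have hnotm : (p : Int) ∉ t := by rw [hpm]; exact (List.nodup_cons.mp hnd).1
      simp only [hpN]
      rw [getD_set_self _ _ _ _ hm.2]
      have hmem : ((m.toNat : Int) ∈ m :: t) := by
        rw [← hpN, hpm]; exact List.mem_cons_self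
      rw [if_pos hmem, if_neg (by rw [← hpN]; exact hnotm)]
      ring
    · have hne : m.toNat ≠ p := by omega
      rw [getD_set_ne _ _ _ hne]
      have hiff : ((p:Int) ∈ m :: t) ↔ ((p:Int) ∈ t) := by simp [List.mem_cons, hpm]
      simp only [hiff]

def rows (t N : Nat) : List (List Int) :=
  (List.range t).map (fun q => (List.range N).map (Rv q))

theorem rows_length (t N : Nat) : (rows t N).length = t := by simp [rows]

theorem rows_getD (t N q : Nat) (h : q < t) :
    (rows t N).getD q [] = (List.range N).map (Rv q) :=
  PySem.List.getD_map_range _ t q _ h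

theorem rows_succ (t N : Nat) :
    rows (t + 1) N = rows t N ++ [(List.range N).map (Rv t)] := by
  simp [rows, List.range_succ]

theorem toNat_cast_sub_one (x : Nat) : ((x : Int) - 1).toNat = x - 1 := by omega

theorem pyRange_one_map (a b : Int) (ha : 0 ≤ a) :
    PySem.List.pyRange a b 1 = (List.range' a.toNat (b - a).toNat).map (fun x : Nat => (x : Int)) := by
  rw [PySem.List.pyRange_one, List.range'_eq_map_range, List.map_map]
  refine List.map_congr_left (fun x _ => ?_)
  simp only [Function.comp_apply]
  omega

theorem stage2zero {α : Type} (nL : List α) (m : Nat) :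
    (List.range m).foldl
        (fun acc i => nL.foldl
          (fun acc (_ : α) => acc.set i ((acc.getD i []) ++ [(0 : Int)])) acc)
        (List.replicate m ([] : List Int))
      = List.replicate m (List.replicate nL.length 0) := by
  have h := stage2 nL m []
  simp only [List.nil_append, List.length_nil] at h
  rw [List.range_eq_range']
  exact h

theorem fillVals0 (N : Nat) (g : Nat → Int) :
    (List.range N).foldl (fun r j => r.set j (g j)) (List.replicate N (0 : Int))
      = (List.range N).map g := by
  rw [List.range_eq_range']
  have h := fillVals N g 0 [] (List.replicate N 0) rfl (by simp)
  simpa using h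

theorem foldInvRange {σ : Type} (Inv : Nat → σ → Prop) (G : σ → Nat → σ) (m : Nat) (s : σ)
    (hstep : ∀ t s', t < m → Inv t s' → Inv (t + 1) (G s' t)) (h0 : Inv 0 s) :
    Inv m ((List.range m).foldl G s) := by
  rw [List.range_eq_range']
  have := foldInv Inv G m 0 s (fun t s' _ ht2 hI => hstep t s' (by omega) hI) h0
  simpa using this

theorem rowIdentity (t j : Nat) :
    (∑ m ∈ Finset.Icc 1 (j + 1), ∑ l ∈ m.divisors, Rv t (l - 1)) - Rv t j = Rv (t + 1) j := by
  rw [dirichlet (fun l => Rv t (l - 1)) (j + 1),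
    Finset.sum_Icc_succ_top (by omega : 1 ≤ j + 1) (fun l => Rv t (l - 1) * (((j+1)/l : ℕ) : ℤ)),
    Nat.div_self (by omega : 0 < j + 1)]
  simp only [Nat.add_sub_cancel, Nat.cast_one, mul_one]
  rw [add_sub_cancel_right, ← Finset.Ico_add_one_right_eq_Icc, Finset.sum_Ico_eq_sum_range]
  simp only [Nat.add_sub_cancel]
  rw [show Rv (t + 1) j = ∑ l ∈ Finset.range j, Rv t l * (((j + 1) / (l + 1) : ℕ) : ℤ) from rfl]
  refine Finset.sum_congr rfl (fun i _ => ?_)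
  rw [show 1 + i - 1 = i by omega, show 1 + i = i + 1 by omega]

theorem sieveFold (row : List Int) (N : Nat) : ∀ (ls : List Int) (d : List Int),
    d.length = N + 1 → (∀ l ∈ ls, 1 ≤ l) → ∀ (p : Nat),
    ((ls.foldl (fun d l => (PySem.List.pyRange l ((N : Int) + 1) l).foldl
        (fun d m => d.set m.toNat (d.getD m.toNat 0 + row.getD (l - 1).toNat 0)) d) d).getD p 0
      = d.getD p 0
        + (ls.map (fun l => if (p : Int) ∈ PySem.List.pyRange l ((N : Int) + 1) l
            then row.getD (l - 1).toNat 0 else 0)).sum)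
    ∧ (ls.foldl (fun d l => (PySem.List.pyRange l ((N : Int) + 1) l).foldl
        (fun d m => d.set m.toNat (d.getD m.toNat 0 + row.getD (l - 1).toNat 0)) d) d).length
      = d.length := by
  intro ls
  induction ls with
  | nil => intro d _ _ p; simp
  | cons l tl ih =>
    intro d hd hpos p
    have hl : 1 ≤ l := hpos l (by simp)
    have hbounds : ∀ m ∈ PySem.List.pyRange l ((N : Int) + 1) l, 0 ≤ m ∧ m.toNat < d.length := by
      intro m hm
      rw [PySem.List.mem_pyRange_iff_of_pos (by omega)] at hm
      constructor
      · omega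
      · omega
    have hnd : (PySem.List.pyRange l ((N : Int) + 1) l).Nodup := by
      rw [PySem.List.pyRange_of_pos _ _ (by omega : (0:Int) < l)]
      refine (List.nodup_range).map ?_
      intro k1 k2 he
      have h2 : (l : Int) * k1 = l * k2 := by
        have := add_left_cancel he
        exact this
      have := mul_left_cancel₀ (by omega : (l:Int) ≠ 0) h2
      exact_mod_cast this
    obtain ⟨hv, hlen⟩ := addMultiples (row.getD (l - 1).toNat 0)
      (PySem.List.pyRange l ((N : Int) + 1) l) d p hbounds hnd
    obtain ⟨ihv, ihl⟩ := ih _ (by rw [hlen, hd]) (fun x hx => hpos x (by simp [hx])) p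
    rw [List.foldl_cons]
    constructor
    · rw [ihv, hv, List.map_cons, List.sum_cons]
      ring
    · rw [ihl, hlen]

theorem sieveEval (t N p : Nat) (hp1 : 1 ≤ p) (hpN : p ≤ N) :
    ((PySem.List.pyRange 1 ((N : Int) + 1)).foldl
        (fun d l => (PySem.List.pyRange l ((N : Int) + 1) l).foldl
          (fun d m => d.set m.toNat (d.getD m.toNat 0
            + ((List.range N).map (Rv t)).getD (l - 1).toNat 0)) d)
        (List.replicate (N + 1) (0 : Int))).getD p 0
      = ∑ l ∈ p.divisors, Rv t (l - 1) := by
  obtain ⟨hv, _⟩ := sieveFold ((List.range N).map (Rv t)) N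
    (PySem.List.pyRange 1 ((N : Int) + 1)) (List.replicate (N + 1) 0)
    (by simp) (fun l hl => by rw [PySem.List.mem_pyRange_one] at hl; omega) p
  rw [hv]
  rw [List.getD_eq_getElem?_getD]
  simp only [List.getElem?_replicate]
  rw [pyRange_one_map 1 ((N : Int) + 1) (by omega), Int.toNat_one,
    show ((N : Int) + 1 - 1) = (N : Int) by ring, Int.toNat_natCast,
    List.range'_eq_map_range, List.map_map, List.map_map, sum_map_range]
  have hpt : ∀ y, y < N →
      ((if (p : Int) ∈ PySem.List.pyRange ((1 + y : ℕ) : ℤ) ((N : Int) + 1) ((1 + y : ℕ) : ℤ)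
        then ((List.range N).map (Rv t)).getD (((1 + y : ℕ) : ℤ) - 1).toNat 0 else 0)
      = (if (1 + y) ∣ p then Rv t y else 0)) := by
    intro y hy
    have hmem : ((p : Int) ∈ PySem.List.pyRange ((1 + y : ℕ) : ℤ) ((N : Int) + 1) ((1 + y : ℕ) : ℤ))
        ↔ ((1 + y) ∣ p) := by
      rw [PySem.List.mem_pyRange_iff_of_pos (by omega)]
      constructor
      · rintro ⟨_, _, hdvd⟩
        have h2 : ((1 + y : ℕ) : ℤ) ∣ (p : Int) := by
          have := dvd_add hdvd (dvd_refl ((1 + y : ℕ) : ℤ))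
          simpa using this
        exact_mod_cast h2
      · intro hdvd
        have hle : 1 + y ≤ p := Nat.le_of_dvd (by omega) hdvd
        refine ⟨by omega, by omega, ?_⟩
        exact dvd_sub (by exact_mod_cast hdvd) dvd_rfl
    rw [show (((1 + y : ℕ) : ℤ) - 1).toNat = y by omega,
      PySem.List.getD_map_range _ N y _ hy]
    exact if_congr hmem rfl rfl
  rw [if_pos (show p < N + 1 by omega)]
  simp only [Function.comp_def, Option.getD_some, zero_add]
  have hright : ∑ l ∈ p.divisors, Rv t (l - 1)
      = ∑ y ∈ Finset.range N, (if (1 + y) ∣ p then Rv t y else 0) := by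
    rw [← divisors_filter p N hp1 hpN, Finset.sum_filter, ← Finset.Ico_add_one_right_eq_Icc,
      Finset.sum_Ico_eq_sum_range]
    simp only [Nat.add_sub_cancel]
    refine Finset.sum_congr rfl (fun i _ => ?_)
    rw [show 1 + i - 1 = i by omega]
  rw [hright]
  refine Finset.sum_congr rfl (fun y hy => ?_)
  rw [Finset.mem_range] at hy
  exact hpt y hy

theorem rv_spec (k n : Int) (hk : 1 ≤ k) (hn : 1 ≤ n) :
    f k n = Rv (k.toNat - 1) (n.toNat - 1) := by
  obtain ⟨K, rfl⟩ : ∃ K : ℕ, k = (K : Int) := ⟨k.toNat, by omega⟩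
  obtain ⟨N, rfl⟩ : ∃ N : ℕ, n = (N : Int) := ⟨n.toNat, by omega⟩
  have hK : 1 ≤ K := by omega
  have hN : 1 ≤ N := by omega
  rw [show (K : Int).toNat = K from Int.toNat_natCast K,
      show (N : Int).toNat = N from Int.toNat_natCast N]
  simp only [f, Int.toNat_natCast, PySem.List.pyRange_zero_natCast, List.foldl_map]
  rw [stage1, List.length_range, List.nil_append, stage2zero, List.length_range]
  rw [show List.replicate K (List.replicate N (0:Int))
      = (List.replicate N (0:Int)) :: List.replicate (K-1) (List.replicate N 0) by
    rw [← List.replicate_succ]; congr 1; omega]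
  rw [setRow0 (List.range N) (fun y r => r.set y ((y : Int) + 1))]
  rw [show (List.range N).foldl (fun r y => r.set y ((y : Int) + 1)) (List.replicate N (0:Int))
      = (List.range N).map (Rv 0) from fillVals0 N (fun y => (y : Int) + 1)]
  rw [pyRange_one_map 1 (K : Int) (by omega),
      show ((K : Int) - 1).toNat = K - 1 by omega, List.foldl_map]
  simp only [Int.toNat_natCast, toNat_cast_sub_one, Int.toNat_one]
  have hres := foldInv
    (fun t acc => acc = rows t N ++ List.replicate (K - t) (List.replicate N 0))
    (fun x y =>
      List.foldl
        (fun x' y1 =>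
          x'.set y
            ((x'.getD y []).set y1
              (List.foldl
                (fun ans l =>
                  ans + (x'.getD (y - 1) []).getD (l - 1).toNat 0
                    * PySem.Int.floordiv (↑y1 + 1) l)
                0 (PySem.List.pyRange 1 (↑y1 + 1)))))
        x (List.range N))
    (K - 1) 1
    (List.map (Rv 0) (List.range N) :: List.replicate (K - 1) (List.replicate N 0))
    ?hstep ?hinit
  case hinit => simp [rows]
  case hstep =>
    intro t s' ht1 ht2 hs'
    subst hs'
    beta_reduce
    rw [show K - t = (K - t - 1) + 1 by omega, List.replicate_succ]
    rw [midfold (List.range N) (rows t N) (List.replicate (K-t-1) (List.replicate N 0)) t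
      (rows_length t N)
      (fun x' y1 =>
        List.foldl
          (fun ans l =>
            ans + (x'.getD (t - 1) []).getD (l - 1).toNat 0
              * PySem.Int.floordiv (↑y1 + 1) l)
          0 (PySem.List.pyRange 1 (↑y1 + 1)))
      ?hG (List.replicate N 0)]
    case hG =>
      intro row' j
      beta_reduce
      rw [List.getD_append (rows t N) _ _ _ (by rw [rows_length]; omega),
          List.getD_append (rows t N) _ _ _ (by rw [rows_length]; omega)]
    rw [fillVals0 N,
        List.getD_append (rows t N) _ [] (t-1) (by rw [rows_length]; omega),
        rows_getD t N (t-1) (by omega)]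
    have hmap : ∀ j ∈ List.range N,
        (PySem.List.pyRange 1 ((j : Int) + 1)).foldl
          (fun ans l =>
            ans + ((List.range N).map (Rv (t-1))).getD (l - 1).toNat 0
              * PySem.Int.floordiv ((j : Int) + 1) l) 0 = Rv t j := by
      intro j hj
      rw [List.mem_range] at hj
      rw [pyRange_one_map 1 ((j : Int) + 1) (by omega), Int.toNat_one,
          show ((j : Int) + 1 - 1) = (j : Int) by ring, Int.toNat_natCast,
          List.range'_eq_map_range, List.map_map, List.foldl_map]
      simp only [Function.comp_def]
      rw [ansFold ((List.range N).map (Rv (t-1))) (t-1) j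
        (fun ln hln => PySem.List.getD_map_range _ N ln _ (by omega)),
        show t - 1 + 1 = t by omega]
    rw [List.map_congr_left hmap, rows_succ, show K - (t+1) = K - t - 1 by omega]
    simp [List.append_assoc]
  rw [show 1 + (K - 1) = K by omega] at hres
  simp only [Nat.sub_self, List.replicate_zero, List.append_nil] at hres
  rw [hres, rows_getD K N (K-1) (by omega),
      PySem.List.getD_map_range _ N (N-1) _ (by omega)]

theorem rv_spec_alt (k n : Int) (hk : 1 ≤ k) (hn : 1 ≤ n) :
    f_alt k n = Rv (k.toNat - 1) (n.toNat - 1) := by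
  obtain ⟨K, rfl⟩ : ∃ K : ℕ, k = (K : Int) := ⟨k.toNat, by omega⟩
  obtain ⟨N, rfl⟩ : ∃ N : ℕ, n = (N : Int) := ⟨n.toNat, by omega⟩
  have hK : 1 ≤ K := by omega
  have hN : 1 ≤ N := by omega
  rw [show (K : Int).toNat = K from Int.toNat_natCast K,
      show (N : Int).toNat = N from Int.toNat_natCast N]
  simp only [f_alt, Int.toNat_natCast, PySem.List.pyRange_zero_natCast, List.foldl_map]
  simp only [show ((N : Int) + 1).toNat = N + 1 by omega,
    show ∀ y : ℕ, ((y : Int) + 1).toNat = y + 1 from fun y => by omega]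
  rw [show ((N : Int) - 1).toNat = N - 1 by omega,
    show ((K : Int) - 1) = ((K - 1 : ℕ) : ℤ) by omega,
    PySem.List.pyRange_zero_natCast, List.foldl_map]
  have h0 : PySem.List.pyRange 1 ((N : Int) + 1) = (List.range N).map (Rv 0) := by
    rw [pyRange_one_map 1 ((N : Int) + 1) (by omega), Int.toNat_one,
      show ((N : Int) + 1 - 1) = (N : Int) by ring, Int.toNat_natCast,
      List.range'_eq_map_range, List.map_map]
    refine List.map_congr_left (fun y _ => ?_)
    simp only [Function.comp_apply]
    show ((1 + y : ℕ) : ℤ) = Rv 0 y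
    show ((1 + y : ℕ) : ℤ) = (y : ℤ) + 1
    push_cast; ring
  have hres := foldInvRange (fun t row => row = (List.range N).map (Rv t))
    (fun row (_ : ℕ) =>
      (List.foldl
        (fun x y =>
          (x.1 ++
              [x.2 +
                    (List.foldl
                          (fun d l =>
                            List.foldl (fun d m => d.set m.toNat (d.getD m.toNat 0 + row.getD (l - 1).toNat 0))
                              d (PySem.List.pyRange l (↑N + 1) l))
                          (List.replicate (N + 1) 0) (PySem.List.pyRange 1 (↑N + 1))).getD
                      (y + 1) 0 -
                  row.getD y 0],
            x.2 +
              (List.foldl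
                    (fun d l =>
                      List.foldl (fun d m => d.set m.toNat (d.getD m.toNat 0 + row.getD (l - 1).toNat 0)) d
                        (PySem.List.pyRange l (↑N + 1) l))
                    (List.replicate (N + 1) 0) (PySem.List.pyRange 1 (↑N + 1))).getD
                (y + 1) 0))
        (([], 0) : List Int × Int) (List.range N)).1)
    (K - 1) (PySem.List.pyRange 1 ((N : Int) + 1)) ?hstep h0
  case hstep =>
    intro t row' ht hrow
    subst hrow
    beta_reduce
    have hD : ∀ j : ℕ, j < N →
        (List.foldl
          (fun d l =>
            List.foldl (fun d m => d.set m.toNat (d.getD m.toNat 0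
              + ((List.range N).map (Rv t)).getD (l - 1).toNat 0))
              d (PySem.List.pyRange l (↑N + 1) l))
          (List.replicate (N + 1) 0) (PySem.List.pyRange 1 (↑N + 1))).getD (j + 1) 0
        = ∑ l ∈ (j + 1).divisors, Rv t (l - 1) := fun j hj =>
      sieveEval t N (j + 1) (by omega) (by omega)
    have hpre := foldInvRange
      (fun j s => s.1 = (List.range j).map (Rv (t + 1))
        ∧ s.2 = ∑ m ∈ Finset.Icc 1 j, ∑ l ∈ m.divisors, Rv t (l - 1))
      (fun x y =>
        (x.1 ++
            [x.2 +
                  (List.foldl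
                        (fun d l =>
                          List.foldl (fun d m => d.set m.toNat (d.getD m.toNat 0
                            + ((List.range N).map (Rv t)).getD (l - 1).toNat 0))
                            d (PySem.List.pyRange l (↑N + 1) l))
                        (List.replicate (N + 1) 0) (PySem.List.pyRange 1 (↑N + 1))).getD
                    (y + 1) 0 -
                ((List.range N).map (Rv t)).getD y 0],
          x.2 +
            (List.foldl
                  (fun d l =>
                    List.foldl (fun d m => d.set m.toNat (d.getD m.toNat 0
                      + ((List.range N).map (Rv t)).getD (l - 1).toNat 0))
                      d (PySem.List.pyRange l (↑N + 1) l))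
                  (List.replicate (N + 1) 0) (PySem.List.pyRange 1 (↑N + 1))).getD
              (y + 1) 0))
      N (([], 0) : List Int × Int) ?hpstep ⟨by simp, by simp⟩
    case hpstep =>
      intro j s hj hs
      obtain ⟨h1, h2⟩ := hs
      beta_reduce
      constructor
      · show s.1 ++ [_] = _
        rw [h1, h2, hD j hj,
          PySem.List.getD_map_range (Rv t) N j 0 hj,
          show (∑ m ∈ Finset.Icc 1 j, ∑ l ∈ m.divisors, Rv t (l - 1))
              + (∑ l ∈ (j + 1).divisors, Rv t (l - 1))
              - Rv t j = Rv (t + 1) j by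
            rw [← Finset.sum_Icc_succ_top (by omega : 1 ≤ j + 1)
              (fun m => ∑ l ∈ m.divisors, Rv t (l - 1))]
            exact rowIdentity t j,
          List.range_succ, List.map_append]
        rfl
      · show s.2 + _ = _
        rw [h2, hD j hj,
          Finset.sum_Icc_succ_top (by omega : 1 ≤ j + 1)
            (fun m => ∑ l ∈ m.divisors, Rv t (l - 1))]
    exact hpre.1
  beta_reduce at hres
  rw [hres, PySem.List.getD_map_range _ N (N - 1) _ (by omega)]

-- ===== VERDICT (by name: the statement is the Claim_ definition above) =====
theorem f_spec : Claim_equal_f := by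
  intro k n _ hpre
  unfold Spec_f
  rw [rv_spec k n hpre.1 hpre.2, rv_spec_alt k n hpre.1 hpre.2]
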